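-- pv_equiv track=rewrite | github.com/sbooma/python-programs | unique_integers.py | unique_integers
-- ===== SOURCE A (Python) =====
-- def unique_integers(n):
--   list = []
--   if n == 0:
--     return list
--   sum = 0
--   for i in range(1, n):
--     list.append(i)
--     sum = sum + i
--   list.append(-sum)
--   return list
-- ===== SOURCE B (Python) =====
-- def unique_integers(n):
--   if n == 0:
--     return []
--   s = n * (n - 1) // 2 if n > 1 else 0
--   return list(range(1, n)) + [-s]
-- ===== Notes on version B (the rewrite author's own statement) =====
-- stated objective: simpler
-- what changed: Replaces the accumulator loop (append + running sum) with list(range(1, n)) and the closed-form Gauss sum n*(n-1)//2, guarded so non-positive n give 0 as the empty loop does.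
import Mathlib
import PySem

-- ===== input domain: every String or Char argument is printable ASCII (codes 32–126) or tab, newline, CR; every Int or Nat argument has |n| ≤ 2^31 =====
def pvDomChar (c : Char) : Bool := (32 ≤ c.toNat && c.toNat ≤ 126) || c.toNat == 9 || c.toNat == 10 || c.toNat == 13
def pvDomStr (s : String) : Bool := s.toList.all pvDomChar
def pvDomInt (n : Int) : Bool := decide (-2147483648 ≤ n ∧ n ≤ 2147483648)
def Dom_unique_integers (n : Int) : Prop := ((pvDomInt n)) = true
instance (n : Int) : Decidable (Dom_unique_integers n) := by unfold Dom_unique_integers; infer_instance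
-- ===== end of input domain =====

-- B replaces A's accumulator loop by list(range(1,n)) plus the closed-form sum n*(n-1)//2 (simpler).

-- ===== PORT A =====
def unique_integers (n : Int) : List Int :=
  if n == 0 then [] else
  let r := (PySem.List.pyRange 1 n 1).foldl
    (fun (p : List Int × Int) i => (p.1 ++ [i], p.2 + i)) ([], 0)
  r.1 ++ [-r.2]

-- ===== PORT B =====
def unique_integers_alt (n : Int) : List Int :=
  if n == 0 then [] else
  let s : Int := if n > 1 then PySem.Int.floordiv (n * (n - 1)) 2 else 0
  PySem.List.pyRange 1 n 1 ++ [-s]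

-- ===== PRECONDITION & SPEC =====
def Spec_unique_integers (n : Int) (out : List Int) : Prop := out = unique_integers_alt n
instance (n : Int) (out : List Int) : Decidable (Spec_unique_integers n out) := by unfold Spec_unique_integers; infer_instance

-- ===== CLAIM (what is proved, stated in full; the proofs are below) =====
def Claim_equal_unique_integers : Prop := ∀ (n : Int), Dom_unique_integers n → Spec_unique_integers n (unique_integers n)

-- ===== LEMMAS AND PROOFS =====

theorem ui_foldl_pair (l : List Int) (acc : List Int) (s : Int) :
    l.foldl (fun (p : List Int × Int) i => (p.1 ++ [i], p.2 + i)) (acc, s)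
      = (acc ++ l, s + l.sum) := by
  induction l generalizing acc s with
  | nil => simp
  | cons x xs ih => simp [List.foldl, ih]; ring

theorem ui_two_mul_sum (m : Nat) :
    2 * ((List.range m).map (fun k : Nat => (1 : Int) + (k : Int))).sum = (m : Int) * (m + 1) := by
  induction m with
  | zero => simp
  | succ m ih =>
    rw [List.range_succ, List.map_append, List.sum_append]
    simp only [List.map_cons, List.map_nil, List.sum_cons, List.sum_nil]
    push_cast at ih ⊢
    linarith

theorem ui_sum_range (n : Int) (h : 1 < n) :
    (PySem.List.pyRange 1 n 1).sum = PySem.Int.floordiv (n * (n - 1)) 2 := by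
  rw [PySem.List.pyRange_one]
  have hm := ui_two_mul_sum (n - 1).toNat
  have hcast : ((n - 1).toNat : Int) = n - 1 := by omega
  rw [hcast] at hm
  have hdiv : PySem.Int.floordiv (n * (n - 1)) 2 = (n * (n - 1)) / 2 := by
    simp [PySem.Int.floordiv, Int.fdiv_eq_ediv]
  rw [hdiv, show n * (n - 1) = (n - 1) * (n - 1 + 1) from by ring]
  omega

-- ===== VERDICT (by name: the statement is the Claim_ definition above) =====
theorem unique_integers_spec : Claim_equal_unique_integers := by
  intro n _
  unfold Spec_unique_integers unique_integers unique_integers_alt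
  by_cases h0 : n = 0
  · simp [h0]
  · simp only [beq_iff_eq, h0, if_false]
    rw [ui_foldl_pair]
    by_cases h1 : 1 < n
    · simp [h1, ui_sum_range n h1]
    · have : PySem.List.pyRange 1 n 1 = [] := PySem.List.pyRange_one_eq_nil (by omega)
      simp [this, h1]
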